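-- pv_equiv track=rewrite | github.com/icarus1513/pythonAlgorithm | Level3/야근 지수.py | solution
-- ===== SOURCE A (Python) =====
-- import heapq
--
-- def solution(n, works):
--     for i in range(len(works)):
--         works[i] *= -1
--
--     heapq.heapify(works)
--
--     for i in range(n):
--         m = heapq.heappop(works)
--         if m >= 0:
--             break
--         m += 1
--         heapq.heappush(works, m)
--
--     answer = 0
--     for i in range(len(works)):
--         answer += pow(works[i] * -1, 2)
--
--     return answer
-- ===== SOURCE B (Python) =====
-- def solution(n, works):
--     if n <= 0 or not works:
--         return sum(w * w for w in works)
--     # run-length encode the sorted (descending) work list: [(value, count), ...]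
--     runs = []
--     for w in sorted(works, reverse=True):
--         if runs and runs[-1][0] == w:
--             runs[-1] = (w, runs[-1][1] + 1)
--         else:
--             runs.append((w, 1))
--     cur, c = runs[0]
--     if cur <= 0:
--         # nothing positive to reduce
--         return sum(v * v * k for v, k in runs)
--     # lower the top block of c elements level by level; one divmod splits the leftover budget
--     budget = n
--     i = 1
--     while True:
--         if i == len(runs):
--             if budget < c * cur:
--                 q, r = divmod(budget, c)
--                 hi = cur - q
--                 return r * (hi - 1) ** 2 + (c - r) * hi ** 2
--             return 0
--         v, k = runs[i]
--         nxt = v if v > 0 else 0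
--         drop = c * (cur - nxt)
--         if budget < drop:
--             q, r = divmod(budget, c)
--             hi = cur - q
--             return r * (hi - 1) ** 2 + (c - r) * hi ** 2 + sum(x * x * m for x, m in runs[i:])
--         if nxt == 0:
--             return sum(x * x * m for x, m in runs[i:])
--         budget -= drop
--         cur, c, i = v, c + k, i + 1
-- ===== Notes on version B (the rewrite author's own statement) =====
-- stated objective: alternative
-- what changed: A simulates n unit decrements on a heap; B run-length-encodes the sorted list and lowers whole blocks of equal maxima level by level, finishing with one divmod that splits the leftover budget, so the number of loop steps depends on the number of distinct values instead of on n.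
-- intended difference: When n >= 1 and every element of works is negative, A's first heap pop discards one maximal element before breaking and returns the sum of squares minus that element's square, while B returns the full sum of squares; no work was reducible, so no element should be dropped and B's value is the intended one. — e.g. on solution(1, [-2]): A returns 0, B returns 4
-- crash fix: On works = [] with n >= 1 A raises IndexError (heappop from an empty heap); B returns 0, the sum of squares of no elements. — e.g. on solution(1, []): A raises IndexError, B returns 0
import Mathlib
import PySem

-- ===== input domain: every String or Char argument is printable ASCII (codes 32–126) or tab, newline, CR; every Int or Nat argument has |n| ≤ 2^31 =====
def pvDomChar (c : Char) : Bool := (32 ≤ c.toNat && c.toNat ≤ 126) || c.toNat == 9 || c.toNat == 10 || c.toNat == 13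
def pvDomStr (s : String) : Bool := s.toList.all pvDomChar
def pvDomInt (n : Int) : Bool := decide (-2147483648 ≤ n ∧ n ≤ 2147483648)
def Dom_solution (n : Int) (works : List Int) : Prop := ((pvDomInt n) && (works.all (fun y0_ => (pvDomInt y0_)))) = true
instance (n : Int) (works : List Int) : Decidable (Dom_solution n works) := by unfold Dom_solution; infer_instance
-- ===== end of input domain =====

-- B replaces A's n single-unit heap decrements by one level-by-level sweep over the
-- run-length-encoded sorted list, with a single divmod splitting the leftover budget
-- (a different algorithm; A also mutates `works` in place — the equivalence proved
-- here is about the return value only).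

-- ===== PORT A =====
-- heapq is modelled at the value level: heapify is the identity on the multiset of
-- elements, heappop removes the minimum (Python's heappop returns the minimum; the
-- returned sum only depends on the multiset, so this is exact for the return value).
def solnLoop : Nat → List Int → List Int
  | 0, l => l
  | k+1, l =>
    match l.min? with
    | none => l        -- heappop on an empty heap raises IndexError: excluded by Pre_
    | some m => if 0 ≤ m then l.erase m else solnLoop k ((m + 1) :: l.erase m)

def solution (n : Int) (works : List Int) : Int :=
  let l := works.map (fun w => w * -1)
  (solnLoop n.toNat l).foldl (fun a w => a + (w * -1) ^ 2) 0

-- ===== PORT B =====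
def encStep (runs : List (Int × Int)) (w : Int) : List (Int × Int) :=
  match runs.getLast? with
  | some (v, c) => if v = w then runs.dropLast ++ [(w, c + 1)] else runs ++ [(w, 1)]
  | none => [(w, 1)]

def encodeRuns (ws : List Int) : List (Int × Int) := ws.foldl encStep []

def sumRuns (rs : List (Int × Int)) : Int := (rs.map (fun p => p.1 * p.1 * p.2)).sum

def walk : Int → Int → Int → List (Int × Int) → Int
  | b, cur, c, [] =>
    if b < c * cur then
      let q := PySem.Int.floordiv b c
      let r := PySem.Int.mod b c
      let hi := cur - q
      r * (hi - 1) ^ 2 + (c - r) * hi ^ 2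
    else 0
  | b, cur, c, (v, k) :: t =>
    let nxt := if 0 < v then v else 0
    let drop := c * (cur - nxt)
    if b < drop then
      let q := PySem.Int.floordiv b c
      let r := PySem.Int.mod b c
      let hi := cur - q
      r * (hi - 1) ^ 2 + (c - r) * hi ^ 2 + sumRuns ((v, k) :: t)
    else if nxt = 0 then sumRuns ((v, k) :: t)
    else walk (b - drop) v (c + k) t

def solution_alt (n : Int) (works : List Int) : Int :=
  if n ≤ 0 ∨ works = [] then (works.map (fun w => w * w)).sum
  else
    match encodeRuns (PySem.List.sorted works (fun w => w) true) with
    | [] => 0  -- unreachable: works ≠ []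
    | (cur, c) :: rest =>
      if cur ≤ 0 then sumRuns ((cur, c) :: rest)
      else walk n cur c rest

-- ===== PRECONDITION & SPEC =====
-- Pre_ excludes exactly the inputs where A raises: heappop on an empty heap (works = [] with n ≥ 1).
def Pre_solution (n : Int) (works : List Int) : Prop := works ≠ [] ∨ n ≤ 0
instance (n : Int) (works : List Int) : Decidable (Pre_solution n works) := by unfold Pre_solution; infer_instance
def pvWitness_solution : Int × List Int := (4, [4, 3, 3])

-- When n ≥ 1 and every element of works is negative, A's first heap pop discards one
-- maximal element before breaking, returning the sum of squares minus that element's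
-- square; B returns the full sum of squares — nothing was reducible, so dropping an
-- element is evidently wrong and B's value is the intended one.
def D_solution (n : Int) (works : List Int) : Prop := 1 ≤ n ∧ works ≠ [] ∧ ∀ w ∈ works, w < 0
instance (n : Int) (works : List Int) : Decidable (D_solution n works) := by unfold D_solution; infer_instance

def Spec_solution (n : Int) (works : List Int) (out : Int) : Prop := ¬ D_solution n works → out = solution_alt n works
instance (n : Int) (works : List Int) (out : Int) : Decidable (Spec_solution n works out) := by unfold Spec_solution; infer_instance

def pvDiffWitness_solution : Int × List Int := (1, [-2])
def pvDiffWitnessOut_solution : Int × Int := (0, 4)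

-- On works = [] with n ≥ 1 A raises IndexError (heappop from an empty heap); B returns 0.
def Raises_solution (n : Int) (works : List Int) : Prop := works = [] ∧ 1 ≤ n
instance (n : Int) (works : List Int) : Decidable (Raises_solution n works) := by unfold Raises_solution; infer_instance
def pvRaiseWitness_solution : Int × List Int := (1, [])
def pvRaiseWitnessOut_solution : Int := 0

-- ===== CLAIM (what is proved, stated in full; the proofs are below) =====
def Claim_unchanged_solution : Prop := ∀ (n : Int) (works : List Int), Dom_solution n works → Pre_solution n works → Spec_solution n works (solution n works)
def Claim_changed_solution : Prop := Dom_solution (pvDiffWitness_solution.1) (pvDiffWitness_solution.2) ∧ Pre_solution (pvDiffWitness_solution.1) (pvDiffWitness_solution.2) ∧ D_solution (pvDiffWitness_solution.1) (pvDiffWitness_solution.2) ∧ solution (pvDiffWitness_solution.1) (pvDiffWitness_solution.2) = pvDiffWitnessOut_solution.1 ∧ solution_alt (pvDiffWitness_solution.1) (pvDiffWitness_solution.2) = pvDiffWitnessOut_solution.2 ∧ pvDiffWitnessOut_solution.1 ≠ pvDiffWitnessOut_solution.2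
def Claim_exact_solution : Prop := ∀ (n : Int) (works : List Int), Dom_solution n works → Pre_solution n works → D_solution n works → solution n works ≠ solution_alt n works
def Claim_raises_solution : Prop := (∀ (n : Int) (works : List Int), Dom_solution n works → Raises_solution n works → ¬ Pre_solution n works) ∧ (Dom_solution (pvRaiseWitness_solution.1) (pvRaiseWitness_solution.2) ∧ Raises_solution (pvRaiseWitness_solution.1) (pvRaiseWitness_solution.2) ∧ solution_alt (pvRaiseWitness_solution.1) (pvRaiseWitness_solution.2) = pvRaiseWitnessOut_solution)

-- ===== LEMMAS AND PROOFS =====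

-- run lists: well-formedness (strictly decreasing values, positive counts) and flattening
def WfRuns (R : List (Int × Int)) : Prop :=
  List.IsChain (fun p q => q.1 < p.1) R ∧ ∀ p ∈ R, 1 ≤ p.2

def runsToList (R : List (Int × Int)) : List Int :=
  R.flatMap (fun p => List.replicate p.2.toNat p.1)

def mergeFront (v : Int) : List (Int × Int) → List (Int × Int)
  | [] => [(v, 1)]
  | (w, k) :: t => if w = v then (v, k + 1) :: t else (v, 1) :: (w, k) :: t

def unitStep (cur c : Int) (rest : List (Int × Int)) : List (Int × Int) :=
  if c = 1 then mergeFront (cur - 1) rest else (cur, c - 1) :: mergeFront (cur - 1) rest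

-- the value A's loop state is worth, expressed on runs
def AR (k : Nat) (R : List (Int × Int)) : Int :=
  match R with
  | [] => 0
  | (cur, c) :: rest =>
    if cur ≤ 0 then (if k = 0 then sumRuns R else sumRuns R - cur * cur)
    else walk (k : Int) cur c rest

lemma sqFold_eq_sum_aux (l : List Int) (a : Int) :
    l.foldl (fun a w => a + (w * -1) ^ 2) a = a + (l.map (fun w => w * w)).sum := by
  induction l generalizing a with
  | nil => simp
  | cons x xs ih => simp only [List.foldl_cons, List.map_cons, List.sum_cons, ih]; ring

lemma sqFold_eq_sum (l : List Int) :
    l.foldl (fun a w => a + (w * -1) ^ 2) 0 = (l.map (fun w => w * w)).sum := by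
  simpa using sqFold_eq_sum_aux l 0

-- recursive right-to-left run builder: the shape the induction wants
def encodeRunsRec : List Int → List (Int × Int)
  | [] => []
  | w :: ws =>
    match encodeRunsRec ws with
    | (v, c) :: t => if v = w then (w, c + 1) :: t else (w, 1) :: (v, c) :: t
    | [] => [(w, 1)]

-- head-merge, the step encodeRunsRec performs
def hmRun (w : Int) (r : List (Int × Int)) : List (Int × Int) :=
  match r with
  | (v, c) :: t => if v = w then (w, c + 1) :: t else (w, 1) :: (v, c) :: t
  | [] => [(w, 1)]

lemma encodeRunsRec_cons (w : Int) (ws : List Int) :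
    encodeRunsRec (w :: ws) = hmRun w (encodeRunsRec ws) := by
  cases h : encodeRunsRec ws with
  | nil => simp [encodeRunsRec, hmRun, h]
  | cons p t => obtain ⟨v, c⟩ := p; simp [encodeRunsRec, hmRun, h]

lemma encStep_cons (v c w : Int) (t : List (Int × Int)) (ht : t ≠ []) :
    encStep ((v, c) :: t) w = (v, c) :: encStep t w := by
  cases t with
  | nil => exact absurd rfl ht
  | cons u t' =>
    obtain ⟨p, h⟩ : ∃ p, (u :: t').getLast? = some p := by
      cases hu : (u :: t').getLast? with
      | none => simp at hu
      | some p => exact ⟨p, rfl⟩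
    obtain ⟨a, b⟩ := p
    simp only [encStep, List.getLast?_cons_cons, h, List.dropLast_cons₂, List.cons_append]
    split <;> rfl

lemma hmRun_cons_eq (x c : Int) (t : List (Int × Int)) :
    hmRun x ((x, c) :: t) = (x, c + 1) :: t := by simp [hmRun]

lemma hmRun_cons_ne (x v c : Int) (t : List (Int × Int)) (h : v ≠ x) :
    hmRun x ((v, c) :: t) = (x, 1) :: (v, c) :: t := by simp [hmRun, h]

lemma hmRun_encStep (x w : Int) (r : List (Int × Int)) :
    hmRun x (encStep r w) = encStep (hmRun x r) w := by
  cases r with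
  | nil =>
    by_cases hwx : w = x
    · subst hwx; simp [encStep, hmRun]
    · simp [encStep, hmRun, hwx, Ne.symm hwx]
  | cons p t =>
    obtain ⟨v, c⟩ := p
    cases t with
    | nil =>
      by_cases hvw : v = w
      · subst hvw
        by_cases hvx : v = x
        · subst hvx; simp [encStep, hmRun]
        · simp [encStep, hmRun, hvx, Ne.symm hvx]
      · by_cases hvx : v = x
        · subst hvx; simp [encStep, hmRun, hvw]
        · simp [encStep, hmRun, hvw, hvx, Ne.symm hvx]
    | cons u t' =>
      rw [encStep_cons v c w (u :: t') (by simp)]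
      by_cases hvx : v = x
      · subst hvx
        rw [hmRun_cons_eq, hmRun_cons_eq, encStep_cons v (c + 1) w (u :: t') (by simp)]
      · rw [hmRun_cons_ne x v c _ hvx, hmRun_cons_ne x v c _ hvx,
          encStep_cons x 1 w ((v, c) :: u :: t') (by simp),
          encStep_cons v c w (u :: t') (by simp)]

lemma encodeRunsRec_append (ws : List Int) (w : Int) :
    encodeRunsRec (ws ++ [w]) = encStep (encodeRunsRec ws) w := by
  induction ws with
  | nil => rfl
  | cons x ws' ih =>
    rw [show (x :: ws') ++ [w] = x :: (ws' ++ [w]) from rfl]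
    rw [encodeRunsRec_cons, encodeRunsRec_cons, ih, hmRun_encStep]

lemma encodeRuns_eq_rec (ws : List Int) : encodeRuns ws = encodeRunsRec ws := by
  induction ws using List.reverseRecOn with
  | nil => rfl
  | append_singleton ws w ih =>
    rw [show encodeRuns (ws ++ [w]) = encStep (encodeRuns ws) w from by
      simp [encodeRuns, List.foldl_append], ih, encodeRunsRec_append]

lemma encodeRuns_sorted (ws : List Int) (h : ws.Pairwise (fun a b => b ≤ a)) :
    WfRuns (encodeRunsRec ws) ∧ runsToList (encodeRunsRec ws) = ws := by
  induction ws with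
  | nil => exact ⟨⟨List.IsChain.nil, by intro p hp; simp [encodeRunsRec] at hp⟩, rfl⟩
  | cons w ws ih =>
    rw [List.pairwise_cons] at h
    obtain ⟨hle, hpw⟩ := h
    obtain ⟨⟨hch, hcnt⟩, htl⟩ := ih hpw
    cases hE : encodeRunsRec ws with
    | nil =>
      have hws : ws = [] := by rw [hE] at htl; simpa [runsToList] using htl.symm
      subst hws
      refine ⟨⟨by simp [encodeRunsRec], ?_⟩, by simp [encodeRunsRec, runsToList]⟩
      intro p hp; simp [encodeRunsRec] at hp; simp [hp]
    | cons p t =>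
      obtain ⟨v, c⟩ := p
      rw [hE] at hch hcnt htl
      have hc1 : 1 ≤ c := hcnt (v, c) (by simp)
      have hcnn : (0:Int) ≤ c := by omega
      have hhead : ∃ tl, ws = v :: tl := by
        rw [← htl]
        simp only [runsToList, List.flatMap_cons]
        have : c.toNat = (c.toNat - 1) + 1 := by omega
        rw [this, List.replicate_succ]
        exact ⟨_, rfl⟩
      obtain ⟨tl, htlws⟩ := hhead
      have hvw : v ≤ w := hle v (by simp [htlws])
      by_cases hvweq : v = w
      · simp only [encodeRunsRec, hE, if_pos hvweq]
        constructor
        · constructor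
          · rw [List.isChain_cons] at hch ⊢
            exact ⟨fun y hy => by have := hch.1 y hy; omega, hch.2⟩
          · intro p hp
            rcases List.mem_cons.mp hp with h1 | h1
            · simp [h1]; omega
            · exact hcnt p (List.mem_cons_of_mem _ h1)
        · simp only [runsToList, List.flatMap_cons] at htl ⊢
          have h1 : (c + 1).toNat = c.toNat + 1 := by omega
          rw [h1, List.replicate_succ, hvweq] at *
          rw [List.cons_append]
          rw [← hvweq, htl]
      · have hvlt : v < w := lt_of_le_of_ne hvw hvweq
        simp only [encodeRunsRec, hE, if_neg hvweq]
        refine ⟨⟨?_, ?_⟩, ?_⟩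
        · rw [List.isChain_cons]
          exact ⟨fun y hy => by simp at hy; simp [← hy, hvlt], hch⟩
        · intro p hp
          rcases List.mem_cons.mp hp with h1 | h1
          · simp [h1]
          · exact hcnt p h1
        · simp only [runsToList, List.flatMap_cons] at htl ⊢
          simp [List.replicate_succ, htl]

lemma runs_values_le (cur c : Int) (rest : List (Int × Int))
    (hwf : WfRuns ((cur, c) :: rest)) :
    ∀ w ∈ runsToList ((cur, c) :: rest), w ≤ cur := by
  induction rest generalizing cur c with
  | nil =>
    intro w hw
    simp only [runsToList, List.flatMap_cons, List.flatMap_nil, List.append_nil] at hw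
    rw [List.eq_of_mem_replicate hw]
  | cons p t ih =>
    intro w hw
    obtain ⟨v, j⟩ := p
    obtain ⟨hch, hcnt⟩ := hwf
    rw [List.isChain_cons] at hch
    have hvc : v < cur := by have := hch.1 (v, j) (by simp); simpa using this
    simp only [runsToList, List.flatMap_cons, List.mem_append] at hw
    rcases hw with h1 | h1
    · rw [List.eq_of_mem_replicate h1]
    · have hwf' : WfRuns ((v, j) :: t) := ⟨hch.2, fun p hp => hcnt p (List.mem_cons_of_mem _ hp)⟩
      have := ih v j hwf' w (by simpa [runsToList, List.flatMap_cons] using h1)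
      omega

lemma sum_sq_runs (R : List (Int × Int)) (hwf : ∀ p ∈ R, 0 ≤ p.2) :
    ((runsToList R).map (fun w => w * w)).sum = sumRuns R := by
  induction R with
  | nil => simp [runsToList, sumRuns]
  | cons p t ih =>
    obtain ⟨v, c⟩ := p
    have hc : (0:Int) ≤ c := hwf (v, c) (by simp)
    have ht := ih (fun p hp => hwf p (List.mem_cons_of_mem _ hp))
    simp only [runsToList, List.flatMap_cons, List.map_append, List.sum_append,
      List.map_replicate, List.sum_replicate, sumRuns, List.map_cons, List.sum_cons] at *
    rw [ht]
    have : ((c.toNat : Int)) = c := by omega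
    rw [nsmul_eq_mul, this]
    ring

lemma min_of_perm (l : List Int) (cur c : Int) (rest : List (Int × Int))
    (hwf : WfRuns ((cur, c) :: rest))
    (hp : l.Perm ((runsToList ((cur, c) :: rest)).map (fun w => w * -1))) :
    l.min? = some (-cur) := by
  rw [List.min?_eq_some_iff]
  constructor
  · apply hp.mem_iff.mpr
    apply List.mem_map.mpr
    refine ⟨cur, ?_, by ring⟩
    simp only [runsToList, List.flatMap_cons, List.mem_append]
    left
    apply List.mem_replicate.mpr
    have : 1 ≤ c := hwf.2 (cur, c) (by simp)
    exact ⟨by omega, rfl⟩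
  · intro x hx
    have hx' := hp.mem_iff.mp hx
    obtain ⟨w, hw, hwx⟩ := List.mem_map.mp hx'
    have := runs_values_le cur c rest hwf w hw
    omega

lemma erase_perm_runs (l : List Int) (cur c : Int) (rest : List (Int × Int))
    (hwf : WfRuns ((cur, c) :: rest))
    (hp : l.Perm ((runsToList ((cur, c) :: rest)).map (fun w => w * -1))) :
    (l.erase (-cur)).Perm ((runsToList ((cur, c - 1) :: rest)).map (fun w => w * -1)) := by
  have hc : 1 ≤ c := hwf.2 (cur, c) (by simp)
  have hsplit : runsToList ((cur, c) :: rest) = cur :: runsToList ((cur, c - 1) :: rest) := by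
    simp only [runsToList, List.flatMap_cons]
    have : c.toNat = (c - 1).toNat + 1 := by omega
    rw [this, List.replicate_succ, List.cons_append]
  have := (List.Perm.erase (-cur) hp)
  rw [hsplit] at this
  simpa [List.erase_cons_head] using this

lemma unitStep_wf (cur c : Int) (rest : List (Int × Int))
    (hwf : WfRuns ((cur, c) :: rest)) :
    WfRuns (unitStep cur c rest) := by
  obtain ⟨hch, hcnt⟩ := hwf
  rw [List.isChain_cons] at hch
  have hc : 1 ≤ c := hcnt (cur, c) (by simp)
  have hmf : WfRuns (mergeFront (cur - 1) rest) ∧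
      (∀ y ∈ (mergeFront (cur - 1) rest).head?, y.1 = cur - 1) := by
    cases rest with
    | nil =>
      refine ⟨⟨?_, ?_⟩, ?_⟩
      · simp [mergeFront]
      · intro p hp; simp [mergeFront] at hp; simp [hp]
      · intro y hy; simp only [mergeFront, List.head?_cons, Option.mem_def, Option.some.injEq] at hy; simp [← hy]
    | cons p t =>
      obtain ⟨v, j⟩ := p
      have hvc : v < cur := by have := hch.1 (v, j) (by simp); simpa using this
      by_cases hv : v = cur - 1
      · refine ⟨⟨?_, ?_⟩, ?_⟩
        · simp only [mergeFront, if_pos hv]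
          rw [List.isChain_cons] at hch ⊢
          refine ⟨fun y hy => ?_, hch.2.2⟩
          have := hch.2.1 y hy; omega
        · intro q hq
          simp only [mergeFront, if_pos hv] at hq
          rcases List.mem_cons.mp hq with h1 | h1
          · have := hcnt (v, j) (by simp); simp [h1]; simp at this; omega
          · exact hcnt q (by simp only [List.mem_cons] at h1 ⊢; tauto)
        · intro y hy; simp only [mergeFront, if_pos hv, List.head?_cons, Option.mem_def, Option.some.injEq] at hy; simp [← hy]
      · refine ⟨⟨?_, ?_⟩, ?_⟩
        · simp only [mergeFront, if_neg hv]
          rw [List.isChain_cons]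
          refine ⟨fun y hy => ?_, hch.2⟩
          simp at hy; rw [← hy]; simp; omega
        · intro q hq
          simp only [mergeFront, if_neg hv] at hq
          rcases List.mem_cons.mp hq with h1 | h1
          · simp [h1]
          · exact hcnt q (by simp only [List.mem_cons] at h1 ⊢; tauto)
        · intro y hy; simp only [mergeFront, if_neg hv, List.head?_cons, Option.mem_def, Option.some.injEq] at hy; simp [← hy]
  unfold unitStep
  split
  · exact hmf.1
  · refine ⟨?_, ?_⟩
    · rw [List.isChain_cons]
      refine ⟨fun y hy => ?_, hmf.1.1⟩
      have := hmf.2 y hy; simp only [this]; omega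
    · intro p hp
      rcases List.mem_cons.mp hp with h1 | h1
      · simp [h1]; omega
      · exact hmf.1.2 p h1

lemma unitStep_toList (cur c : Int) (rest : List (Int × Int))
    (hwf : WfRuns ((cur, c) :: rest)) :
    (runsToList (unitStep cur c rest)).Perm ((cur - 1) :: runsToList ((cur, c - 1) :: rest)) := by
  have hc : 1 ≤ c := hwf.2 (cur, c) (by simp)
  have hmf : runsToList (mergeFront (cur - 1) rest) = (cur - 1) :: runsToList rest := by
    cases rest with
    | nil => simp [mergeFront, runsToList]
    | cons p t =>
      obtain ⟨v, j⟩ := p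
      by_cases hv : v = cur - 1
      · have hj : 1 ≤ j := hwf.2 (v, j) (by simp)
        simp only [mergeFront, if_pos hv]
        simp only [runsToList, List.flatMap_cons]
        subst hv
        have : (j + 1).toNat = j.toNat + 1 := by omega
        rw [this, List.replicate_succ, List.cons_append]
      · simp [mergeFront, if_neg hv, runsToList]
  unfold unitStep
  split
  · rename_i hc1
    rw [hmf]
    subst hc1
    simp [runsToList]
  · simp only [runsToList, List.flatMap_cons] at *
    rw [hmf]
    have : (c - 1).toNat = c.toNat - 1 := by omega
    exact List.perm_middle

lemma dm_small (b c : Int) (h0 : 0 ≤ b) (h : b < c) :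
    PySem.Int.floordiv b c = 0 ∧ PySem.Int.mod b c = b := by
  have hc : 0 < c := by omega
  rw [PySem.Int.floordiv_eq_ediv_of_pos hc, PySem.Int.mod_eq_emod_of_pos hc]
  exact ⟨Int.ediv_eq_zero_of_lt h0 h, Int.emod_eq_of_lt h0 h⟩

lemma dm_shift (b c : Int) (hc : 0 < c) :
    PySem.Int.floordiv (b - c) c = PySem.Int.floordiv b c - 1 ∧
    PySem.Int.mod (b - c) c = PySem.Int.mod b c := by
  rw [PySem.Int.floordiv_eq_ediv_of_pos hc, PySem.Int.mod_eq_emod_of_pos hc,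
    PySem.Int.floordiv_eq_ediv_of_pos hc, PySem.Int.mod_eq_emod_of_pos hc]
  constructor
  · have := Int.add_mul_ediv_right b (-1) (by omega : c ≠ 0)
    have h2 : b + -1 * c = b - c := by ring
    rw [h2] at this
    omega
  · exact Int.sub_emod_right b c

lemma walk_zero (cur c : Int) (rest : List (Int × Int))
    (hwf : WfRuns ((cur, c) :: rest)) (hcur : 0 < cur) :
    walk 0 cur c rest = c * cur ^ 2 + sumRuns rest := by
  have hc : 1 ≤ c := hwf.2 (cur, c) (by simp)
  obtain ⟨hq, hr⟩ := dm_small 0 c (le_refl 0) (by omega)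
  cases rest with
  | nil =>
    have h1 : (0:Int) < c * cur := mul_pos (by omega) hcur
    simp only [walk, if_pos h1, hq, hr, sumRuns, List.map_nil, List.sum_nil]
    ring
  | cons p t =>
    obtain ⟨v, j⟩ := p
    have hvc : v < cur := by
      have := hwf.1; rw [List.isChain_cons] at this
      have := this.1 (v, j) (by simp); simpa using this
    have hnxt : (if 0 < v then v else 0) < cur := by split <;> omega
    have h1 : (0:Int) < c * (cur - (if 0 < v then v else 0)) := mul_pos (by omega) (by omega)
    simp only [walk, if_pos h1, hq, hr]
    ring

lemma walk_peel (b cur c : Int) (rest : List (Int × Int))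
    (hc : 1 ≤ c) (hcur : 1 ≤ cur)
    (hrest : ∀ p ∈ rest.head?, p.1 ≤ cur - 1) :
    walk b cur c rest = walk (b - c) (cur - 1) c rest := by
  have hc0 : (0:Int) < c := by omega
  obtain ⟨hq, hr⟩ := dm_shift b c hc0
  cases rest with
  | nil =>
    have harith : c * (cur - 1) = c * cur - c := by ring
    simp only [walk, hq, hr, harith]
    by_cases h1 : b < c * cur
    · rw [if_pos h1, if_pos (by omega)]
      ring
    · rw [if_neg h1, if_neg (by omega)]
  | cons p t =>
    obtain ⟨v, j⟩ := p
    have hv1 : v ≤ cur - 1 := hrest (v, j) (by simp)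
    simp only [walk, hq, hr]
    set nxt := (if 0 < v then v else 0) with hnxtdef
    have hnxt : nxt ≤ cur - 1 := by rw [hnxtdef]; split <;> omega
    have harith : c * (cur - 1 - nxt) = c * (cur - nxt) - c := by ring
    simp only [harith]
    by_cases h1 : b < c * (cur - nxt)
    · rw [if_pos h1, if_pos (by omega : b - c < c * (cur - nxt) - c)]
      ring
    · rw [if_neg h1, if_neg (by omega : ¬(b - c < c * (cur - nxt) - c))]
      by_cases h3 : nxt = 0
      · rw [if_pos h3, if_pos h3]
      · rw [if_neg h3, if_neg h3]
        have h2 : b - c - (c * (cur - nxt) - c) = b - c * (cur - nxt) := by ring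
        rw [h2]

lemma sumRuns_mergeFront (v : Int) (R : List (Int × Int)) :
    sumRuns (mergeFront v R) = v * v + sumRuns R := by
  cases R with
  | nil => simp [mergeFront, sumRuns]
  | cons p t =>
    obtain ⟨w, j⟩ := p
    by_cases hw : w = v
    · subst hw; simp only [mergeFront, if_true, sumRuns, List.map_cons, List.sum_cons]; ring
    · simp only [mergeFront, if_neg hw, sumRuns, List.map_cons, List.sum_cons]; ring

lemma walk_nil_eval (b cur c : Int) :
    walk b cur c [] = if b < c * cur then
        PySem.Int.mod b c * (cur - PySem.Int.floordiv b c - 1) ^ 2 +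
          (c - PySem.Int.mod b c) * (cur - PySem.Int.floordiv b c) ^ 2
      else 0 := by
  simp only [walk]

lemma walk_cons_of_pos (b cur c v j : Int) (t : List (Int × Int)) (hv : 0 < v) :
    walk b cur c ((v, j) :: t) =
      if b < c * (cur - v) then
        PySem.Int.mod b c * (cur - PySem.Int.floordiv b c - 1) ^ 2 +
          (c - PySem.Int.mod b c) * (cur - PySem.Int.floordiv b c) ^ 2 + sumRuns ((v, j) :: t)
      else walk (b - c * (cur - v)) v (c + j) t := by
  simp only [walk, if_pos hv, if_neg (by omega : ¬v = 0)]

lemma walk_cons_of_nonpos (b cur c v j : Int) (t : List (Int × Int)) (hv : ¬0 < v) :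
    walk b cur c ((v, j) :: t) =
      if b < c * cur then
        PySem.Int.mod b c * (cur - PySem.Int.floordiv b c - 1) ^ 2 +
          (c - PySem.Int.mod b c) * (cur - PySem.Int.floordiv b c) ^ 2 + sumRuns ((v, j) :: t)
      else sumRuns ((v, j) :: t) := by
  simp only [walk, if_neg hv, if_true, sub_zero]

lemma walk_small (b cur c : Int) (rest : List (Int × Int))
    (hhead : ∀ p ∈ rest.head?, p.1 ≤ cur - 1)
    (hb0 : 0 ≤ b) (hb : b < c) (hcur : 1 ≤ cur) :
    walk b cur c rest = b * (cur - 1) ^ 2 + (c - b) * cur ^ 2 + sumRuns rest := by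
  obtain ⟨hq, hr⟩ := dm_small b c hb0 hb
  cases rest with
  | nil =>
    rw [walk_nil_eval, if_pos, hq, hr]
    · simp only [sumRuns, List.map_nil, List.sum_nil]; ring
    · have : c ≤ c * cur := le_mul_of_one_le_right (by omega) hcur
      omega
  | cons p t =>
    obtain ⟨v, j⟩ := p
    have hv : v ≤ cur - 1 := hhead (v, j) (by simp)
    by_cases hvp : 0 < v
    · rw [walk_cons_of_pos _ _ _ _ _ _ hvp, if_pos, hq, hr]
      · ring
      · have h1 : c ≤ c * (cur - v) := le_mul_of_one_le_right (by omega) (by omega)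
        omega
    · rw [walk_cons_of_nonpos _ _ _ _ _ _ hvp, if_pos, hq, hr]
      · ring
      · have : c ≤ c * cur := le_mul_of_one_le_right (by omega) hcur
        omega

lemma AR_cons_pos (k : Nat) (v cnt : Int) (tail : List (Int × Int)) (hv : 0 < v) :
    AR k ((v, cnt) :: tail) = walk (k : Int) v cnt tail := by
  simp only [AR, if_neg (by omega : ¬v ≤ 0)]

lemma mergeFront_eq_of_head (v j : Int) (t : List (Int × Int)) :
    mergeFront v ((v, j) :: t) = (v, j + 1) :: t := by
  simp [mergeFront]

lemma mergeFront_eq_of_ne (v w j : Int) (t : List (Int × Int)) (h : w ≠ v) :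
    mergeFront v ((w, j) :: t) = (v, 1) :: (w, j) :: t := by
  simp [mergeFront, h]

lemma mergeFront_nil (v : Int) : mergeFront v [] = [(v, 1)] := rfl

lemma AR_cons_nonpos (k : Nat) (v cnt : Int) (tail : List (Int × Int)) (hv : v ≤ 0) :
    AR k ((v, cnt) :: tail) =
      if k = 0 then sumRuns ((v, cnt) :: tail) else sumRuns ((v, cnt) :: tail) - v * v := by
  simp only [AR, if_pos hv]

lemma AR_mergeFront_zero (k : Nat) (rest : List (Int × Int)) :
    AR k (mergeFront 0 rest) = sumRuns rest := by
  cases rest with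
  | nil =>
    rw [mergeFront_nil, AR_cons_nonpos k 0 1 [] (le_refl 0)]
    split <;> (simp [sumRuns])
  | cons p t =>
    obtain ⟨w, j⟩ := p
    by_cases hw : w = 0
    · subst hw
      rw [mergeFront_eq_of_head, AR_cons_nonpos k 0 (j+1) t (le_refl 0)]
      have h1 : sumRuns ((0, j + 1) :: t) = sumRuns ((0, j) :: t) := by simp [sumRuns]
      rw [h1]; split <;> ring
    · rw [mergeFront_eq_of_ne 0 w j t hw, AR_cons_nonpos k 0 1 _ (le_refl 0)]
      have h1 : sumRuns ((0, 1) :: (w, j) :: t) = sumRuns ((w, j) :: t) := by simp [sumRuns]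
      rw [h1]; split <;> ring

lemma walk_succ (k : Nat) (cur c : Int) (rest : List (Int × Int))
    (hwf : WfRuns ((cur, c) :: rest)) (hcur : 0 < cur) :
    walk ((k : Int) + 1) cur c rest = AR k (unitStep cur c rest) := by
  have hc : 1 ≤ c := hwf.2 (cur, c) (by simp)
  have hheadlt : ∀ p ∈ rest.head?, p.1 < cur := by
    intro p hp
    have h := hwf.1
    rw [List.isChain_cons] at h
    exact h.1 p hp
  have hheadle : ∀ p ∈ rest.head?, p.1 ≤ cur - 1 := fun p hp => by have := hheadlt p hp; omega
  by_cases hc1 : c = 1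
  · -- c = 1: unitStep is just mergeFront (cur - 1) rest
    subst hc1
    have hstep : unitStep cur 1 rest = mergeFront (cur - 1) rest := by simp [unitStep]
    rw [hstep]
    by_cases hcur1 : cur = 1
    · -- cur = 1: the decremented element lands on 0
      subst hcur1
      rw [show (1:Int) - 1 = 0 from rfl, AR_mergeFront_zero]
      cases rest with
      | nil =>
        rw [walk_nil_eval, if_neg (by omega)]
        simp [sumRuns]
      | cons p t =>
        obtain ⟨v, j⟩ := p
        have hv : v ≤ 0 := by have := hheadle (v, j) (by simp); omega
        rw [walk_cons_of_nonpos _ _ _ _ _ _ (by omega), if_neg (by omega)]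
    · -- cur ≥ 2
      have hpeel := walk_peel ((k : Int) + 1) cur 1 rest (le_refl 1) (by omega) hheadle
      rw [hpeel, show (k : Int) + 1 - 1 = (k : Int) from by ring]
      cases rest with
      | nil =>
        rw [mergeFront_nil, AR_cons_pos _ _ _ _ (by omega : (0:Int) < cur - 1)]
      | cons p t =>
        obtain ⟨v, j⟩ := p
        by_cases hv : v = cur - 1
        · subst hv
          rw [mergeFront_eq_of_head, AR_cons_pos _ _ _ _ (by omega : (0:Int) < cur - 1)]
          rw [walk_cons_of_pos _ _ _ _ _ _ (by omega : (0:Int) < cur - 1)]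
          rw [if_neg (by simp)]
          rw [show (k : Int) - 1 * (cur - 1 - (cur - 1)) = (k : Int) from by ring,
            show (1 : Int) + j = j + 1 from by ring]
        · rw [mergeFront_eq_of_ne _ _ _ _ hv, AR_cons_pos _ _ _ _ (by omega : (0:Int) < cur - 1)]
  · -- c ≥ 2: unitStep keeps a block of c - 1 at cur
    have hc2 : 2 ≤ c := by omega
    have hstep : unitStep cur c rest = (cur, c - 1) :: mergeFront (cur - 1) rest := by
      simp [unitStep, hc1]
    rw [hstep, AR_cons_pos _ _ _ _ hcur]
    have hmhead : ∀ p ∈ (mergeFront (cur - 1) rest).head?, p.1 ≤ cur - 1 := by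
      cases rest with
      | nil => rw [mergeFront_nil]; intro p hp; simp at hp; simp [← hp]
      | cons q t =>
        obtain ⟨w, jj⟩ := q
        by_cases hw : w = cur - 1
        · subst hw; rw [mergeFront_eq_of_head]; intro p hp; simp at hp; simp [← hp]
        · rw [mergeFront_eq_of_ne _ _ _ _ hw]; intro p hp; simp at hp; simp [← hp]
    have hsum : sumRuns (mergeFront (cur - 1) rest) = (cur - 1) * (cur - 1) + sumRuns rest :=
      sumRuns_mergeFront (cur - 1) rest
    by_cases hk : (k : Int) < c - 1
    · -- small budget: both sides give the q = 0 divmod closed form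
      rw [walk_small ((k:Int)+1) cur c rest hheadle (by omega) (by omega) (by omega)]
      rw [walk_small (k:Int) cur (c-1) (mergeFront (cur - 1) rest) hmhead (by omega) (by omega) (by omega)]
      rw [hsum]; ring
    · -- large budget: peel one level off the left side
      have hpeel := walk_peel ((k : Int) + 1) cur c rest hc (by omega) hheadle
      rw [hpeel]
      by_cases hcur1 : cur = 1
      · -- cur = 1: after the drop everything non-positive remains on both sides
        subst hcur1
        rw [show (1:Int) - 1 = 0 from rfl] at hmhead hsum ⊢
        have hLHS : walk ((k:Int) + 1 - c) 0 c rest = sumRuns rest := by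
          cases rest with
          | nil =>
            rw [walk_nil_eval, if_neg (by omega)]; simp [sumRuns]
          | cons p t =>
            obtain ⟨v, j⟩ := p
            have hv : v ≤ 0 := by have := hheadle (v, j) (by simp); omega
            rw [walk_cons_of_nonpos _ _ _ _ _ _ (by omega), if_neg (by omega)]
        have hRHS : walk (k:Int) 1 (c-1) (mergeFront 0 rest) = sumRuns rest := by
          cases rest with
          | nil =>
            rw [mergeFront_nil, walk_cons_of_nonpos _ _ _ _ _ _ (by omega), if_neg (by omega)]
            simp [sumRuns]
          | cons q t =>
            obtain ⟨w, jj⟩ := q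
            have hw0 : w ≤ 0 := by have := hheadle (w, jj) (by simp); omega
            by_cases hw : w = 0
            · subst hw
              rw [mergeFront_eq_of_head, walk_cons_of_nonpos _ _ _ _ _ _ (by omega), if_neg (by omega)]
              simp [sumRuns]
            · rw [mergeFront_eq_of_ne _ _ _ _ hw, walk_cons_of_nonpos _ _ _ _ _ _ (by omega), if_neg (by omega)]
              simp [sumRuns]
        rw [hLHS, hRHS]
      · -- cur ≥ 2: the right side drops its top block onto the merged run
        have hcur2 : 2 ≤ cur := by omega
        cases rest with
        | nil =>
          rw [mergeFront_nil, walk_cons_of_pos _ _ _ _ _ _ (by omega : (0:Int) < cur - 1)]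
          rw [if_neg (by simp; omega)]
          rw [show (k:Int) - (c - 1) * (cur - (cur - 1)) = (k:Int) + 1 - c from by ring,
            show c - 1 + 1 = c from by ring]
        | cons q t =>
          obtain ⟨w, jj⟩ := q
          by_cases hw : w = cur - 1
          · subst hw
            rw [mergeFront_eq_of_head]
            rw [walk_cons_of_pos ((k:Int)+1-c) (cur-1) c (cur-1) jj t (by omega : (0:Int) < cur - 1)]
            rw [if_neg (by simp; omega)]
            rw [walk_cons_of_pos (k:Int) cur (c-1) (cur-1) (jj+1) t (by omega : (0:Int) < cur - 1)]
            rw [if_neg (by simp; omega)]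
            rw [show (k:Int) + 1 - c - c * (cur - 1 - (cur - 1)) = (k:Int) - (c-1) * (cur - (cur-1)) from by ring,
              show c + jj = c - 1 + (jj + 1) from by ring]
          · rw [mergeFront_eq_of_ne _ _ _ _ hw, walk_cons_of_pos _ _ _ _ _ _ (by omega : (0:Int) < cur - 1)]
            rw [if_neg (by simp; omega)]
            rw [show (k:Int) - (c - 1) * (cur - (cur - 1)) = (k:Int) + 1 - c from by ring,
              show c - 1 + 1 = c from by ring]

lemma sum_sq_of_perm (l : List Int) (R : List (Int × Int)) (h0 : ∀ p ∈ R, 0 ≤ p.2)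
    (hp : l.Perm ((runsToList R).map (fun w => w * -1))) :
    l.foldl (fun a w => a + (w * -1) ^ 2) 0 = sumRuns R := by
  rw [sqFold_eq_sum]
  rw [(hp.map (fun w => w * w)).sum_eq]
  rw [List.map_map]
  have h2 : ((runsToList R).map ((fun w => w * w) ∘ (fun w => w * -1))) =
      (runsToList R).map (fun w => w * w) := by
    apply List.map_congr_left; intro x hx; simp only [Function.comp]; ring
  rw [h2, sum_sq_runs R h0]

lemma main_loop (k : Nat) (R : List (Int × Int)) (l : List Int)
    (hwf : WfRuns R) (hne : R ≠ [])
    (hp : l.Perm ((runsToList R).map (fun w => w * -1))) :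
    (solnLoop k l).foldl (fun a w => a + (w * -1) ^ 2) 0 = AR k R := by
  induction k generalizing R l with
  | zero =>
    obtain ⟨⟨cur, c⟩, rest, rfl⟩ : ∃ p rest, R = p :: rest := by
      cases R with
      | nil => exact absurd rfl hne
      | cons p rest => exact ⟨p, rest, rfl⟩
    simp only [solnLoop]
    rw [sum_sq_of_perm l _ (fun p hp' => by have := hwf.2 p hp'; omega) hp]
    by_cases hcle : cur ≤ 0
    · simp only [AR, if_pos hcle]
      rw [if_pos trivial]
    · simp only [AR, if_neg hcle, Nat.cast_zero]
      rw [walk_zero cur c rest hwf (by omega)]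
      simp only [sumRuns, List.map_cons, List.sum_cons]
      ring
  | succ k ih =>
    obtain ⟨⟨cur, c⟩, rest, rfl⟩ : ∃ p rest, R = p :: rest := by
      cases R with
      | nil => exact absurd rfl hne
      | cons p rest => exact ⟨p, rest, rfl⟩
    have hc : 1 ≤ c := hwf.2 (cur, c) (by simp)
    have hmin : l.min? = some (-cur) := min_of_perm l cur c rest hwf hp
    simp only [solnLoop, hmin]
    have herase := erase_perm_runs l cur c rest hwf hp
    by_cases hcle : cur ≤ 0
    · rw [if_pos (by omega : (0:Int) ≤ -cur)]
      rw [sum_sq_of_perm _ ((cur, c - 1) :: rest)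
        (fun p hp' => by
          rcases List.mem_cons.mp hp' with h1 | h1
          · simp [h1]; omega
          · have := hwf.2 p (List.mem_cons_of_mem _ h1); omega) herase]
      simp only [AR, if_pos hcle]
      rw [if_neg (by omega : ¬k + 1 = 0)]
      simp only [sumRuns, List.map_cons, List.sum_cons]
      ring
    · rw [if_neg (by omega : ¬(0:Int) ≤ -cur)]
      have hwf' := unitStep_wf cur c rest hwf
      have hne' : unitStep cur c rest ≠ [] := by
        unfold unitStep
        split <;> (cases rest with
          | nil => simp [mergeFront]
          | cons q t =>
            obtain ⟨w, j⟩ := q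
            by_cases hw : w = cur - 1
            · subst hw; simp [mergeFront_eq_of_head]
            · simp [mergeFront_eq_of_ne _ _ _ _ hw])
      have hperm2 : ((-cur + 1) :: l.erase (-cur)).Perm
          ((runsToList (unitStep cur c rest)).map (fun w => w * -1)) := by
        have h1 := (unitStep_toList cur c rest hwf).map (fun w => w * -1)
        refine List.Perm.trans ?_ h1.symm
        simp only [List.map_cons]
        have : (cur - 1) * -1 = -cur + 1 := by ring
        rw [this]
        exact herase.cons _
      have hih := ih (unitStep cur c rest) ((-cur + 1) :: l.erase (-cur)) hwf' hne' hperm2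
      rw [hih]
      simp only [AR, if_neg hcle]
      rw [show ((k + 1 : Nat) : Int) = (k : Int) + 1 from by push_cast; ring]
      exact (walk_succ k cur c rest hwf (by omega)).symm

-- the common core: for a nonempty list and positive budget, A's port equals AR on the
-- run encoding, B's port is its branch on the head value, and the head is the maximum
lemma solution_core (n : Int) (works : List Int) (hw : works ≠ []) (hn : ¬n ≤ 0) :
    ∃ cur c rest, WfRuns ((cur, c) :: rest) ∧ cur ∈ works ∧ (∀ w ∈ works, w ≤ cur) ∧
      solution n works = AR n.toNat ((cur, c) :: rest) ∧
      solution_alt n works =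
        (if cur ≤ 0 then sumRuns ((cur, c) :: rest) else walk n cur c rest) := by
  have hsp := PySem.List.sorted_pairwise_rev works (fun w => w)
  have hperm := PySem.List.sorted_perm works (fun w => w) true
  have henc := encodeRuns_sorted (PySem.List.sorted works (fun w => w) true) (by simpa using hsp)
  obtain ⟨hwf, htol⟩ := henc
  cases hE : encodeRunsRec (PySem.List.sorted works (fun w => w) true) with
  | nil =>
    exfalso
    rw [hE] at htol
    have : PySem.List.sorted works (fun w => w) true = [] := by
      simpa [runsToList] using htol.symm
    exact hw ((PySem.List.sorted_eq_nil_iff works (fun w => w) true).mp this)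
  | cons p rest =>
    obtain ⟨cur, c⟩ := p
    rw [hE] at hwf htol
    have hmemS : ∀ w, w ∈ runsToList ((cur, c) :: rest) ↔ w ∈ works := by
      intro w; rw [htol]; exact hperm.mem_iff
    refine ⟨cur, c, rest, hwf, ?_, ?_, ?_, ?_⟩
    · apply (hmemS cur).mp
      simp only [runsToList, List.flatMap_cons, List.mem_append]
      left
      apply List.mem_replicate.mpr
      have : 1 ≤ c := hwf.2 (cur, c) (by simp)
      exact ⟨by omega, rfl⟩
    · intro w hwm
      exact runs_values_le cur c rest hwf w ((hmemS w).mpr hwm)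
    · have hp : (works.map (fun w => w * -1)).Perm
          ((runsToList ((cur, c) :: rest)).map (fun w => w * -1)) := by
        rw [htol]
        exact (hperm.symm.map _)
      exact main_loop n.toNat ((cur, c) :: rest) (works.map (fun w => w * -1)) hwf (by simp) hp
    · unfold solution_alt
      rw [if_neg (by rintro (h | h); exact hn h; exact hw h), encodeRuns_eq_rec, hE]

-- ===== VERDICT (by name: the statement is the Claim_ definition above) =====
theorem solution_spec : Claim_unchanged_solution := by
  unfold Claim_unchanged_solution
  intro n works _ hpre
  unfold Spec_solution
  intro hD
  by_cases hn : n ≤ 0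
  · unfold solution solution_alt
    rw [if_pos (Or.inl hn)]
    rw [show n.toNat = 0 from by omega]
    simp only [solnLoop]
    rw [sqFold_eq_sum, List.map_map]
    apply congrArg
    apply List.map_congr_left
    intro x hx
    simp only [Function.comp]
    ring
  · have hw : works ≠ [] := by
      rcases hpre with h | h
      · exact h
      · omega
    obtain ⟨cur, c, rest, hwf, hmem, hmax, hA, hB⟩ := solution_core n works hw hn
    rw [hA, hB]
    have hex : ∃ w ∈ works, 0 ≤ w := by
      by_contra hno
      push Not at hno
      exact hD ⟨by omega, hw, fun w hwm => by have := hno w hwm; omega⟩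
    obtain ⟨w0, hw0m, hw0⟩ := hex
    have hcur0 : 0 ≤ cur := le_trans hw0 (hmax w0 hw0m)
    by_cases hcle : cur ≤ 0
    · have hc0 : cur = 0 := by omega
      subst hc0
      rw [if_pos hcle]
      simp only [AR, if_pos hcle]
      rw [if_neg (by omega : ¬n.toNat = 0)]
      ring
    · rw [if_neg hcle]
      simp only [AR, if_neg hcle]
      rw [show ((n.toNat : Int)) = n from by omega]

theorem solution_changed : Claim_changed_solution := by
  unfold Claim_changed_solution; decide

theorem solution_tight : Claim_exact_solution := by
  unfold Claim_exact_solution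
  intro n works _ _ hD
  obtain ⟨hn, hw, hneg⟩ := hD
  obtain ⟨cur, c, rest, hwf, hmem, hmax, hA, hB⟩ := solution_core n works hw (by omega)
  rw [hA, hB]
  have hcur : cur < 0 := hneg cur hmem
  rw [if_pos (by omega : cur ≤ 0)]
  simp only [AR, if_pos (by omega : cur ≤ 0)]
  rw [if_neg (by omega : ¬n.toNat = 0)]
  have : cur * cur > 0 := mul_pos_of_neg_of_neg hcur hcur
  omega

@[simp] theorem solution_raises : Claim_raises_solution := by
  unfold Claim_raises_solution
  refine ⟨?_, by decide⟩
  intro n works _ hr hpre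
  obtain ⟨h1, h2⟩ := hr
  rcases hpre with h | h
  · exact h h1
  · omega
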